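-- pv_equiv track=rewrite | github.com/EslamAsHhraf/RSA-Crypto-Chat | src/utlies.py | ciphering
-- ===== SOURCE A (Python) =====
-- from typing import Tuple
--
-- def pow_mod(B, E, M):
--     if E == 0:
--         return 1
--     elif E == 1:
--         return B % M
--     else:
--         result = pow_mod(B, E // 2, M)
--         if E % 2 == 0:
--             return (result * result) % M
--         else:
--             return (result * result * B) % M
--
-- def rsa_encrypt(public_key: Tuple[int, int], plaintext: int) -> int:
--     """Encrypt the given plaintext using the recipient's public key.
--     """
--     n, e = public_key
--
--     encrypted = pow_mod(plaintext,e,n) ## c=p**e mod n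
--
--     return encrypted
--
-- def ciphering(text,public_key,j):
--     result=0
--     for i in range (5):
--         if(ord(text[j+i])==32):# space
--             result=result+pow(37,(4-i))*36
--         elif(ord(text[j+i])<97):# number
--             result=result+pow(37,(4-i))*(ord(text[j+i])-48)
--         else:# char
--             result=result+pow(37,(4-i))*(ord(text[j+i])-97+10)
--     ciphertext=rsa_encrypt(public_key,result)
--     return ciphertext
-- ===== SOURCE B (Python) =====
-- def ciphering(text, public_key, j):
--     # Horner's scheme for the base-37 encoding (no pow(37, 4-i) terms),
--     # then an iterative LSB-first square-and-multiply for the RSA step.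
--     value = 0
--     for i in range(5):
--         c = ord(text[j + i])
--         if c == 32:      # space
--             d = 36
--         elif c < 97:     # number
--             d = c - 48
--         else:            # char
--             d = c - 97 + 10
--         value = value * 37 + d
--     n, e = public_key
--     r = 1
--     b = value
--     while e > 0:
--         if e % 2 == 1:
--             r = r * b % n
--         b = b * b % n
--         e //= 2
--     return r
-- ===== Notes on version B (the rewrite author's own statement) =====
-- stated objective: alternative
-- what changed: Replaces the pow(37,4-i)-weighted summation with Horner's scheme (value = value*37 + digit, no powers formed) and the recursive top-down halving pow_mod with an iterative LSB-first square-and-multiply while-loop.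
import Mathlib
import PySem

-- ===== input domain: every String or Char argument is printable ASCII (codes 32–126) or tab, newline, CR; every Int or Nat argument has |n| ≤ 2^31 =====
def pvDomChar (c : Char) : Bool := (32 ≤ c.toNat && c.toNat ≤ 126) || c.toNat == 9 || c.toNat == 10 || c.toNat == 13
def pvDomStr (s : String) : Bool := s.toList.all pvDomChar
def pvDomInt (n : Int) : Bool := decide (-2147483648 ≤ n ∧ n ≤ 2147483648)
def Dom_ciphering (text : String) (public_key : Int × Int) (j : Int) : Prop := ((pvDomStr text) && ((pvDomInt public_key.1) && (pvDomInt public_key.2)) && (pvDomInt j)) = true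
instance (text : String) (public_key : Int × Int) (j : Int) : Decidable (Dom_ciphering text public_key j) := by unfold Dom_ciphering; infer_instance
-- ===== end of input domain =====

-- B replaces the pow(37,4-i)-weighted sum by Horner's scheme and the recursive
-- halving pow_mod by an iterative LSB-first square-and-multiply loop (objective:
-- alternative/idiomatic; same asymptotic cost).

-- ===== PORT A =====

-- ord(text[k]); Python raises IndexError when the index is out of range — those
-- inputs are excluded by Pre_ciphering, 0 is only a totality default there.
def ordAt (text : String) (k : Int) : Int :=
  match PySem.Str.pyGet? text k with
  | some c => (c.toNat : Int)
  | none => 0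

-- literal port of pow_mod (recursive halving).  For E < 0 Python recurses
-- forever (RecursionError); Pre_ciphering excludes that, 0 is a totality default.
def powModA (B E M : Int) : Int :=
  if _h0 : E = 0 then 1
  else if _h1 : E = 1 then PySem.Int.mod B M
  else if _h2 : E < 0 then 0
  else
    let result := powModA B (PySem.Int.floordiv E 2) M
    if PySem.Int.mod E 2 = 0 then PySem.Int.mod (result * result) M
    else PySem.Int.mod (result * result * B) M
termination_by E.toNat
decreasing_by
  simp only [PySem.Int.floordiv_eq_ediv_of_pos (show (0:Int) < 2 by norm_num)]
  omega

def ciphering (text : String) (public_key : Int × Int) (j : Int) : Int :=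
  powModA
    ((PySem.List.pyRange 0 5 1).foldl (fun result i =>
      if ordAt text (j + i) = 32 then result + 37 ^ ((4:Int) - i).toNat * 36
      else if ordAt text (j + i) < 97 then result + 37 ^ ((4:Int) - i).toNat * (ordAt text (j + i) - 48)
      else result + 37 ^ ((4:Int) - i).toNat * (ordAt text (j + i) - 97 + 10)) 0)
    public_key.2 public_key.1

-- ===== PORT B =====

-- iterative square-and-multiply: while e > 0: if e % 2 == 1: r = r*b % n; b = b*b % n; e //= 2
def powLoop (n e b r : Int) : Int :=
  if _he : e ≤ 0 then r
  else powLoop n (PySem.Int.floordiv e 2) (PySem.Int.mod (b * b) n)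
        (if PySem.Int.mod e 2 = 1 then PySem.Int.mod (r * b) n else r)
termination_by e.toNat
decreasing_by
  simp only [PySem.Int.floordiv_eq_ediv_of_pos (show (0:Int) < 2 by norm_num)]
  omega

def ciphering_alt (text : String) (public_key : Int × Int) (j : Int) : Int :=
  powLoop public_key.1 public_key.2
    ((PySem.List.pyRange 0 5 1).foldl (fun value i =>
      value * 37 +
        (if ordAt text (j + i) = 32 then (36:Int)
         else if ordAt text (j + i) < 97 then ordAt text (j + i) - 48
         else ordAt text (j + i) - 97 + 10)) 0)
    1

-- ===== PRECONDITION & SPEC =====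
-- Pre_ excludes exactly the inputs where Python A raises: an exponent e < 0
-- (unbounded recursion in pow_mod), n = 0 with e ≥ 1 (ZeroDivisionError in %),
-- and indices j..j+4 outside Python's (negative-index-aware) range (IndexError).
def Pre_ciphering (text : String) (public_key : Int × Int) (j : Int) : Prop :=
  0 ≤ public_key.2 ∧ (1 ≤ public_key.2 → public_key.1 ≠ 0) ∧
  -(PySem.Str.len text) ≤ j ∧ j + 4 < PySem.Str.len text
instance (text : String) (public_key : Int × Int) (j : Int) : Decidable (Pre_ciphering text public_key j) := by unfold Pre_ciphering; infer_instance

def pvWitness_ciphering : String × (Int × Int) × Int := ("hello", (77, 3), 0)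

def Spec_ciphering (text : String) (public_key : Int × Int) (j : Int) (out : Int) : Prop := out = ciphering_alt text public_key j
instance (text : String) (public_key : Int × Int) (j : Int) (out : Int) : Decidable (Spec_ciphering text public_key j out) := by unfold Spec_ciphering; infer_instance

-- ===== CLAIM (what is proved, stated in full; the proofs are below) =====
def Claim_equal_ciphering : Prop := ∀ (text : String) (public_key : Int × Int) (j : Int), Dom_ciphering text public_key j → Pre_ciphering text public_key j → Spec_ciphering text public_key j (ciphering text public_key j)

-- ===== LEMMAS AND PROOFS =====

-- n divides x - (x mod n)  (Python mod is fmod; from floordiv_mul_add_mod)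
lemma dvd_sub_pymod (x n : Int) : n ∣ x - PySem.Int.mod x n := by
  refine ⟨PySem.Int.floordiv x n, ?_⟩
  have h := PySem.Int.floordiv_mul_add_mod x n
  linarith [mul_comm n (PySem.Int.floordiv x n)]

-- congruent numbers have the same Python mod (n ≠ 0)
lemma pymod_congr {n : Int} (hn : n ≠ 0) {x y : Int} (h : x ≡ y [ZMOD n]) :
    PySem.Int.mod x n = PySem.Int.mod y n := by
  obtain ⟨k, hk⟩ := Int.ModEq.dvd h
  have hdx := dvd_sub_pymod x n
  have hdy := dvd_sub_pymod y n
  obtain ⟨a, ha⟩ := hdx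
  obtain ⟨c, hc⟩ := hdy
  -- mod x n - mod y n = n * (c - a - k) is a multiple of n strictly inside (-|n|, |n|)
  have hdiff : PySem.Int.mod x n - PySem.Int.mod y n = n * (c - a - k) := by ring_nf; linarith [ha, hc, hk]
  rcases lt_or_gt_of_ne hn with hneg | hpos
  · have b1 := PySem.Int.mod_neg_bounds x hneg
    have b2 := PySem.Int.mod_neg_bounds y hneg
    have : c - a - k = 0 := by nlinarith
    rw [this, mul_zero] at hdiff; linarith
  · have b1 : 0 ≤ PySem.Int.mod x n ∧ PySem.Int.mod x n < n :=
      ⟨PySem.Int.mod_nonneg x hpos, PySem.Int.mod_lt x hpos⟩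
    have b2 : 0 ≤ PySem.Int.mod y n ∧ PySem.Int.mod y n < n :=
      ⟨PySem.Int.mod_nonneg y hpos, PySem.Int.mod_lt y hpos⟩
    have : c - a - k = 0 := by nlinarith
    rw [this, mul_zero] at hdiff; linarith

lemma pymod_modEq (x n : Int) : PySem.Int.mod x n ≡ x [ZMOD n] :=
  Int.modEq_iff_dvd.mpr (dvd_sub_pymod x n)

-- A's recursive pow_mod computes b^e mod n for e ≥ 1
lemma powModA_eq {n : Int} (hn : n ≠ 0) (b : Int) :
    ∀ (m : Nat) (e : Int), e.toNat = m → 1 ≤ e →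
      powModA b e n = PySem.Int.mod (b ^ e.toNat) n := by
  intro m
  induction m using Nat.strong_induction_on with
  | _ m IH =>
    intro e hm he
    rw [powModA]
    by_cases h1 : e = 1
    · subst h1; simp
    · have h2 : 2 ≤ e := by omega
      have hne0 : ¬ e = 0 := by omega
      have hneg : ¬ e < 0 := by omega
      simp only [hne0, h1, hneg, dite_false]
      rw [PySem.Int.floordiv_eq_ediv_of_pos (show (0:Int) < 2 by norm_num),
          PySem.Int.mod_eq_emod_of_pos (show (0:Int) < 2 by norm_num)]
      have hh1 : 1 ≤ e / 2 := by omega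
      have hlt : (e / 2).toNat < m := by omega
      have hr := IH _ hlt (e / 2) rfl hh1
      set h := (e / 2).toNat with hh
      set r := powModA b (e / 2) n with hrdef
      have hcong : r ≡ b ^ h [ZMOD n] := by
        rw [hr]; exact pymod_modEq _ n
      by_cases hev : e % 2 = 0
      · simp only [hev]
        have hexp : e.toNat = h + h := by omega
        rw [hexp, pow_add]
        exact pymod_congr hn (hcong.mul hcong)
      · have hev' : ¬ (e % 2 = 0) := hev
        simp only [hev', if_false]
        have hexp : e.toNat = h + h + 1 := by omega
        rw [hexp, pow_add, pow_add, pow_one]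
        exact pymod_congr hn ((hcong.mul hcong).mul (Int.ModEq.refl b))

-- B's iterative loop maintains r·b^e mod n
lemma powLoop_eq {n : Int} (hn : n ≠ 0) :
    ∀ (m : Nat) (e b r : Int), e.toNat = m → 1 ≤ e →
      powLoop n e b r = PySem.Int.mod (r * b ^ e.toNat) n := by
  intro m
  induction m using Nat.strong_induction_on with
  | _ m IH =>
    intro e b r hm he
    rw [powLoop]
    have hne : ¬ e ≤ 0 := by omega
    simp only [hne, dite_false]
    rw [PySem.Int.floordiv_eq_ediv_of_pos (show (0:Int) < 2 by norm_num),
        PySem.Int.mod_eq_emod_of_pos (show (0:Int) < 2 by norm_num)]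
    by_cases h1 : e = 1
    · subst h1
      norm_num
      rw [powLoop]
      norm_num
    · have h2 : 2 ≤ e := by omega
      have hh1 : 1 ≤ e / 2 := by omega
      have hlt : (e / 2).toNat < m := by omega
      have hIH := IH _ hlt (e / 2) (PySem.Int.mod (b * b) n)
        (if e % 2 = 1 then PySem.Int.mod (r * b) n else r) rfl hh1
      rw [hIH]
      set h := (e / 2).toNat with hh
      have hb : PySem.Int.mod (b * b) n ≡ b * b [ZMOD n] := pymod_modEq _ n
      by_cases hodd : e % 2 = 1
      · simp only [hodd]
        have hexp : e.toNat = 1 + (h + h) := by omega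
        have hcong : PySem.Int.mod (r * b) n * PySem.Int.mod (b * b) n ^ h
            ≡ (r * b) * (b * b) ^ h [ZMOD n] :=
          (pymod_modEq (r * b) n).mul (hb.pow h)
        refine (pymod_congr hn hcong).trans ?_
        congr 1
        rw [hexp, pow_add, pow_one, mul_pow, pow_add]
        ring
      · have hev : e % 2 = 0 := by omega
        simp only [hodd, if_false]
        have hexp : e.toNat = h + h := by omega
        have hcong : r * PySem.Int.mod (b * b) n ^ h ≡ r * (b * b) ^ h [ZMOD n] :=
          (Int.ModEq.refl r).mul (hb.pow h)
        refine (pymod_congr hn hcong).trans ?_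
        congr 1
        rw [hexp, mul_pow, pow_add]

-- the two modular-exponentiation routines agree on Pre_'s exponents
lemma pow_eq (v n e : Int) (he0 : 0 ≤ e) (hne : 1 ≤ e → n ≠ 0) :
    powModA v e n = powLoop n e v 1 := by
  by_cases h : 1 ≤ e
  · rw [powModA_eq (hne h) v e.toNat e rfl h, powLoop_eq (hne h) e.toNat e v 1 rfl h, one_mul]
  · have h0 : e = 0 := by omega
    subst h0
    rw [powModA, powLoop]
    norm_num

-- power-weighted sum = Horner's scheme over the five digits
set_option maxHeartbeats 1000000 in
lemma value_eq (text : String) (j : Int) :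
    ((PySem.List.pyRange 0 5 1).foldl (fun result i =>
      if ordAt text (j + i) = 32 then result + 37 ^ ((4:Int) - i).toNat * 36
      else if ordAt text (j + i) < 97 then result + 37 ^ ((4:Int) - i).toNat * (ordAt text (j + i) - 48)
      else result + 37 ^ ((4:Int) - i).toNat * (ordAt text (j + i) - 97 + 10)) 0)
    = ((PySem.List.pyRange 0 5 1).foldl (fun value i =>
      value * 37 +
        (if ordAt text (j + i) = 32 then (36:Int)
         else if ordAt text (j + i) < 97 then ordAt text (j + i) - 48
         else ordAt text (j + i) - 97 + 10)) 0) := by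
  have hR : PySem.List.pyRange 0 5 1 = [0, 1, 2, 3, 4] := by decide
  rw [hR]
  simp only [List.foldl_cons, List.foldl_nil]
  have hA : ∀ acc p c : Int,
      (if c = 32 then acc + p * 36 else if c < 97 then acc + p * (c - 48) else acc + p * (c - 97 + 10))
        = acc + p * (if c = 32 then 36 else if c < 97 then c - 48 else c - 97 + 10) := by
    intro acc p c; split_ifs <;> ring
  rw [hA, hA, hA, hA, hA]
  generalize ordAt text (j + 0) = c0
  generalize ordAt text (j + 1) = c1
  generalize ordAt text (j + 2) = c2
  generalize ordAt text (j + 3) = c3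
  generalize ordAt text (j + 4) = c4
  generalize (if c0 = 32 then (36:Int) else if c0 < 97 then c0 - 48 else c0 - 97 + 10) = d0
  generalize (if c1 = 32 then (36:Int) else if c1 < 97 then c1 - 48 else c1 - 97 + 10) = d1
  generalize (if c2 = 32 then (36:Int) else if c2 < 97 then c2 - 48 else c2 - 97 + 10) = d2
  generalize (if c3 = 32 then (36:Int) else if c3 < 97 then c3 - 48 else c3 - 97 + 10) = d3
  generalize (if c4 = 32 then (36:Int) else if c4 < 97 then c4 - 48 else c4 - 97 + 10) = d4
  simp only [show ((4:Int) - 0).toNat = 4 from rfl, show ((4:Int) - 1).toNat = 3 from rfl,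
    show ((4:Int) - 2).toNat = 2 from rfl, show ((4:Int) - 3).toNat = 1 from rfl,
    show ((4:Int) - 4).toNat = 0 from rfl]
  ring

-- ===== VERDICT (by name: the statement is the Claim_ definition above) =====
theorem ciphering_spec : Claim_equal_ciphering := by
  intro text public_key j _hdom hpre
  unfold Spec_ciphering ciphering ciphering_alt
  rw [value_eq text j]
  exact pow_eq _ _ _ hpre.1 hpre.2.1
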